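-- pv_equiv track=rewrite | github.com/KoMinjae/codingtest | 배달.py | bfs
-- ===== SOURCE A (Python) =====
-- import collections
--
-- def bfs(route,start,maxcost):
--     queue = collections.deque()
--     visited=set()
--     queue.append([start,[start],0])
--     while queue:
--         n, path, cost = queue.popleft()
--         if cost<=maxcost:
--             if path[-1] not in visited:
--                 visited.add(path[-1])
--         if n in route:
--             for i in route[n]:
--                 if i[0] not in path:
--                     queue.append([i[0],path+[i[0]],cost+i[1]])
--     return visited
-- ===== SOURCE B (Python) =====
-- def bfs(route, start, maxcost):
--     # Iterative-deepening DFS: a recursive, depth-limited search re-run with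
--     # growing depth limit replaces A's FIFO queue of path states.  Weights may
--     # be negative, so the exact semantics (endpoints of simple paths of cost
--     # <= maxcost) requires enumerating simple paths; IDDFS does it with O(depth)
--     # frontier state instead of a queue of whole levels.
--     visited = set()
--
--     def children(n, onpath, cost):
--         return [(v, onpath | {v}, cost + w)
--                 for v, w in route.get(n, ())
--                 if v not in onpath]
--
--     def dfs(state, depth):
--         if depth == 0:
--             n, _, cost = state
--             if cost <= maxcost:
--                 visited.add(n)
--             return True
--         found = False
--         for child in children(*state):
--             if dfs(child, depth - 1):
--                 found = True
--         return found
--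
--     depth = 0
--     while dfs((start, frozenset([start]), 0), depth):
--         depth += 1
--     return visited
-- ===== Notes on version B (the rewrite author's own statement) =====
-- stated objective: alternative
-- what changed: A's FIFO queue of (node, path, cost) states is replaced by iterative-deepening DFS: a recursive depth-limited search over simple paths re-run with a growing depth limit until a depth level is empty, keeping only the recursion stack instead of a whole queue of levels (weights may be negative, so Dijkstra would be inexact and simple paths must be enumerated).
import Mathlib
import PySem

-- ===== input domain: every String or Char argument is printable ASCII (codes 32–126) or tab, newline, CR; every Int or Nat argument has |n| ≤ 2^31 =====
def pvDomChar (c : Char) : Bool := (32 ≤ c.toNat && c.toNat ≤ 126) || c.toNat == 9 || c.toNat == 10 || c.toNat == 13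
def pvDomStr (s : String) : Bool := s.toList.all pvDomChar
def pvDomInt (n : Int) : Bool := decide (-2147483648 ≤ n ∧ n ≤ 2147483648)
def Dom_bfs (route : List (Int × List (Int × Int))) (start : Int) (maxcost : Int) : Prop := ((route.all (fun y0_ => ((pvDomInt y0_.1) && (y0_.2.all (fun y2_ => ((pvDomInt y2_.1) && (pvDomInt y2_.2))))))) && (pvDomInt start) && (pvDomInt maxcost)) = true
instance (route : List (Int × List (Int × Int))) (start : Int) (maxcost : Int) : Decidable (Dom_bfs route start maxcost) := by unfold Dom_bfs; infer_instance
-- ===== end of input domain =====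

-- B replaces A's FIFO queue of (node, path, cost) states by iterative-deepening DFS:
-- a recursive, depth-limited search re-run with a growing depth limit (alternative
-- decomposition; same exact value, weights may be negative so paths must be enumerated).

-- ===== PORT A =====
-- Termination infrastructure shared by both ports (every queued state carries a
-- duplicate-free record of the nodes already on its path; the measure below makes
-- that well-founded without any precondition).
def pvTargets (route : List (Int × List (Int × Int))) : List Int :=
  PySem.Set.ofList (route.flatMap (fun p => p.2.map Prod.fst))

def pvK (route : List (Int × List (Int × Int))) : Nat :=
  route.foldl (fun acc p => max acc p.2.length) 0

def pvSlack (route : List (Int × List (Int × Int))) (l : List Int) : Nat :=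
  ((pvTargets route).filter (fun v => !(l.contains v))).length

def pvMeas (route : List (Int × List (Int × Int))) (it : Int × List Int × Int) : Nat :=
  (pvK route + 1) ^ pvSlack route it.2.1

def pvQMeas (route : List (Int × List (Int × Int))) (q : List (Int × List Int × Int)) : Nat :=
  (q.map (pvMeas route)).sum

lemma pv_get?_mk_mem (l : List (Int × List (Int × Int))) (k : Int) (v : List (Int × Int))
    (h : (PySem.Dict.mk l).get? k = some v) : (k, v) ∈ l := by
  simp only [PySem.Dict.get?, Option.map_eq_some_iff] at h
  obtain ⟨p, hp, rfl⟩ := h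
  have hmem := List.mem_of_find?_eq_some hp
  have hbeq := List.find?_some hp
  have : p.1 = k := by simpa using hbeq
  simpa [← this] using hmem

lemma pv_slack_append (route : List (Int × List (Int × Int))) (l : List Int) (v : Int)
    (hv : v ∈ pvTargets route) (hnl : v ∉ l) :
    pvSlack route (l ++ [v]) + 1 = pvSlack route l := by
  unfold pvSlack
  have hnd : ((pvTargets route).filter (fun x => !(l.contains x))).Nodup :=
    (PySem.Set.nodup_ofList _).filter _
  have hvm : v ∈ (pvTargets route).filter (fun x => !(l.contains x)) := by
    simp [List.mem_filter, hv, hnl]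
  have h1 : (pvTargets route).filter (fun x => !((l ++ [v]).contains x))
      = ((pvTargets route).filter (fun x => !(l.contains x))).filter (fun x => x != v) := by
    rw [List.filter_filter]
    apply List.filter_congr
    intro x _
    by_cases h1 : x ∈ l <;> by_cases h2 : x = v <;> simp [h1, h2, bne]
  rw [h1, ← hnd.erase_eq_filter v, List.length_erase_of_mem hvm]
  have : 0 < ((pvTargets route).filter (fun x => !(l.contains x))).length :=
    List.length_pos_of_mem hvm
  omega

lemma pv_children_meas_lt (route : List (Int × List (Int × Int))) (n : Int) (l : List Int)
    (adj : List (Int × Int)) (hadj : (PySem.Dict.mk route).get? n = some adj)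
    (ch : List (Int × List Int × Int))
    (hlen : ch.length ≤ adj.length)
    (hch : ∀ c ∈ ch, ∃ p ∈ adj, p.1 ∉ l ∧ c.2.1 = l ++ [p.1]) :
    pvQMeas route ch < (pvK route + 1) ^ pvSlack route l := by
  have hpow : 0 < (pvK route + 1) ^ pvSlack route l := pow_pos (Nat.succ_pos _) _
  rcases ch with _ | ⟨c0, ch'⟩
  · simp only [pvQMeas, List.map_nil, List.sum_nil]
    exact hpow
  have htar : ∀ p ∈ adj, p.1 ∈ pvTargets route := by
    intro p hp
    have hmem := pv_get?_mk_mem route n adj hadj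
    simp only [pvTargets, PySem.Set.mem_ofList, List.mem_flatMap]
    exact ⟨(n, adj), hmem, List.mem_map_of_mem hp⟩
  obtain ⟨p0, hp0, hp0l, _⟩ := hch c0 (List.mem_cons_self ..)
  have hslack0 := pv_slack_append route l p0.1 (htar p0 hp0) hp0l
  have hmeas : ∀ c ∈ c0 :: ch', pvMeas route c = (pvK route + 1) ^ (pvSlack route l - 1) := by
    intro c hc
    obtain ⟨p, hp, hpl, hcl⟩ := hch c hc
    have := pv_slack_append route l p.1 (htar p hp) hpl
    unfold pvMeas
    rw [hcl]
    congr 1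
    omega
  have hsum : pvQMeas route (c0 :: ch')
      ≤ (c0 :: ch').length * (pvK route + 1) ^ (pvSlack route l - 1) := by
    unfold pvQMeas
    calc ((c0 :: ch').map (pvMeas route)).sum
        ≤ ((c0 :: ch').map (pvMeas route)).length • ((pvK route + 1) ^ (pvSlack route l - 1)) := by
          apply List.sum_le_card_nsmul
          intro x hx
          obtain ⟨c, hc, rfl⟩ := List.mem_map.mp hx
          exact (hmeas c hc).le
      _ = (c0 :: ch').length * (pvK route + 1) ^ (pvSlack route l - 1) := by
          simp [smul_eq_mul]
  have hK : adj.length ≤ pvK route := by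
    have := (PySem.List.le_foldl_max_nat route (fun p => p.2.length) 0).2
      (n, adj) (pv_get?_mk_mem route n adj hadj)
    simpa [pvK] using this
  have hlt : (c0 :: ch').length * (pvK route + 1) ^ (pvSlack route l - 1)
      < (pvK route + 1) ^ pvSlack route l := by
    have hs : pvSlack route l = (pvSlack route l - 1) + 1 := by omega
    rw [hs, pow_succ]
    have hpow' : 0 < (pvK route + 1) ^ (pvSlack route l - 1) :=
      pow_pos (Nat.succ_pos _) _
    have : (c0 :: ch').length < pvK route + 1 := by omega
    calc (c0 :: ch').length * (pvK route + 1) ^ (pvSlack route l - 1)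
        < (pvK route + 1) * (pvK route + 1) ^ (pvSlack route l - 1) :=
          Nat.mul_lt_mul_of_lt_of_le this le_rfl hpow'
      _ = (pvK route + 1) ^ (pvSlack route l - 1) * (pvK route + 1) := Nat.mul_comm _ _
  exact lt_of_le_of_lt hsum hlt

-- A-side helper: the inner `if n in route: for i in route[n]: …` block of A
def childA (route : List (Int × List (Int × Int))) (it : Int × List Int × Int) :
    List (Int × List Int × Int) :=
  match (PySem.Dict.mk route).get? it.1 with
  | none => []
  | some adj =>
      (adj.filter (fun i => !(it.2.1.contains i.1))).map
        (fun i => (i.1, it.2.1 ++ [i.1], it.2.2 + i.2))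

lemma pv_childA_meas_lt (route : List (Int × List (Int × Int))) (it : Int × List Int × Int) :
    pvQMeas route (childA route it) < pvMeas route it := by
  unfold childA pvMeas
  cases h : (PySem.Dict.mk route).get? it.1 with
  | none =>
      simp only [pvQMeas, List.map_nil, List.sum_nil]
      exact pow_pos (Nat.succ_pos (pvK route)) (pvSlack route it.2.1)
  | some adj =>
      apply pv_children_meas_lt route it.1 it.2.1 adj h
      · simpa using List.length_filter_le _ adj
      · intro c hc
        simp only [List.mem_map, List.mem_filter] at hc
        obtain ⟨p, ⟨hpadj, hpl⟩, rfl⟩ := hc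
        exact ⟨p, hpadj, by simpa using hpl, rfl⟩

lemma pv_qmeas_append (route : List (Int × List (Int × Int)))
    (a b : List (Int × List Int × Int)) :
    pvQMeas route (a ++ b) = pvQMeas route a + pvQMeas route b := by
  simp [pvQMeas]

def loopA (route : List (Int × List (Int × Int))) (maxcost : Int)
    (queue : List (Int × List Int × Int)) (visited : List Int) : List Int :=
  match queue with
  | [] => visited
  | (n, path, cost) :: rest =>
      loopA route maxcost (rest ++ childA route (n, path, cost))
        (if cost ≤ maxcost then
          (if PySem.Set.contains visited (PySem.List.pyGetD path (-1) 0) then visited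
           else PySem.Set.add visited (PySem.List.pyGetD path (-1) 0))
         else visited)
termination_by pvQMeas route queue
decreasing_by
  rw [pv_qmeas_append]
  have h1 := pv_childA_meas_lt route (n, path, cost)
  have h2 : pvQMeas route ((n, path, cost) :: rest)
      = pvMeas route (n, path, cost) + pvQMeas route rest := by simp [pvQMeas, pvMeas]
  omega

def bfs (route : List (Int × List (Int × Int))) (start : Int) (maxcost : Int) : List Int :=
  loopA route maxcost [(start, [start], 0)] PySem.Set.empty

-- ===== PORT B =====
-- B-side helper: Source B's `children(n, onpath, cost)` comprehension
def childB (route : List (Int × List (Int × Int))) (it : Int × List Int × Int) :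
    List (Int × List Int × Int) :=
  (((PySem.Dict.mk route).getD it.1 []).filter (fun p => !(PySem.Set.contains it.2.1 p.1))).map
    (fun p => (p.1, PySem.Set.union it.2.1 (PySem.Set.ofList [p.1]), it.2.2 + p.2))

-- the visited-update Source B performs at depth 0
def updB (maxcost : Int) (vis : List Int) (it : Int × List Int × Int) : List Int :=
  if it.2.2 ≤ maxcost then PySem.Set.add vis it.1 else vis

-- the states at exactly depth d below a state (specification device for dfsB's
-- termination bound; also used by the proofs below)
def itemsB (route : List (Int × List (Int × Int))) :
    Nat → (Int × List Int × Int) → List (Int × List Int × Int)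
  | 0, s => [s]
  | d + 1, s => (childB route s).flatMap (itemsB route d)

-- Source B's recursive `dfs(state, depth)`, with the mutated set `visited` threaded through
def dfsB (route : List (Int × List (Int × Int))) (maxcost : Int) :
    Nat → (Int × List Int × Int) → List Int → List Int × Bool
  | 0, s, vis => (updB maxcost vis s, true)
  | d + 1, s, vis =>
      (childB route s).foldl
        (fun acc c =>
          let r := dfsB route maxcost d c acc.1
          (r.1, acc.2 || r.2))
        (vis, false)

-- characterisation of dfsB: it folds updB over the depth-d states and reports
-- whether any exist (needed by loopB's termination proof, cited in decreasing_by)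
lemma pv_dfsB_spec (route : List (Int × List (Int × Int))) (maxcost : Int) :
    ∀ (d : Nat) (s : Int × List Int × Int) (vis : List Int),
      dfsB route maxcost d s vis
        = ((itemsB route d s).foldl (updB maxcost) vis, !(itemsB route d s).isEmpty) := by
  intro d
  induction d with
  | zero => intro s vis; simp [dfsB, itemsB]
  | succ d ih =>
      intro s vis
      rw [dfsB, itemsB]
      have key : ∀ (l : List (Int × List Int × Int)) (v : List Int) (b : Bool),
          l.foldl (fun (acc : List Int × Bool) c =>
              ((itemsB route d c).foldl (updB maxcost) acc.1,
               acc.2 || !(itemsB route d c).isEmpty)) (v, b)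
            = ((l.flatMap (itemsB route d)).foldl (updB maxcost) v,
               b || !(l.flatMap (itemsB route d)).isEmpty) := by
        intro l
        induction l with
        | nil => intro v b; simp
        | cons c t iht =>
            intro v b
            rw [List.foldl_cons, iht, List.flatMap_cons, List.foldl_append]
            congr 1
            have happ : ∀ (a b' : List (Int × List Int × Int)),
                (a ++ b').isEmpty = (a.isEmpty && b'.isEmpty) := by
              intro a b'; cases a <;> simp
            rw [happ, Bool.not_and, Bool.or_assoc]
      simp only [ih]
      exact key (childB route s) vis false

lemma pv_childB_slack (route : List (Int × List (Int × Int))) (s c : Int × List Int × Int)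
    (hc : c ∈ childB route s) : pvSlack route c.2.1 + 1 = pvSlack route s.2.1 := by
  unfold childB PySem.Dict.getD at hc
  cases h : (PySem.Dict.mk route).get? s.1 with
  | none => rw [h] at hc; simp at hc
  | some adj =>
      rw [h] at hc
      simp only [Option.getD_some, List.mem_map, List.mem_filter] at hc
      obtain ⟨p, ⟨hpadj, hpl⟩, rfl⟩ := hc
      have hnm : p.1 ∉ s.2.1 := by simpa [PySem.Set.contains] using hpl
      have htar : p.1 ∈ pvTargets route := by
        simp only [pvTargets, PySem.Set.mem_ofList, List.mem_flatMap]
        exact ⟨(s.1, adj), pv_get?_mk_mem route s.1 adj h, List.mem_map_of_mem hpadj⟩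
      have hset : PySem.Set.union s.2.1 (PySem.Set.ofList [p.1]) = s.2.1 ++ [p.1] := by
        have hone : PySem.Set.ofList [p.1] = [p.1] := rfl
        rw [hone]
        show PySem.Set.add s.2.1 p.1 = s.2.1 ++ [p.1]
        exact PySem.Set.add_of_not_mem hnm
      show pvSlack route (PySem.Set.union s.2.1 (PySem.Set.ofList [p.1])) + 1 = _
      rw [hset]
      exact pv_slack_append route s.2.1 p.1 htar hnm

-- if any state exists at depth d, then d is at most the remaining slack
-- (needed by loopB's termination proof, cited in decreasing_by)
lemma pv_itemsB_le_slack (route : List (Int × List (Int × Int))) :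
    ∀ (d : Nat) (s : Int × List Int × Int), itemsB route d s ≠ [] → d ≤ pvSlack route s.2.1 := by
  intro d
  induction d with
  | zero => intro s _; exact Nat.zero_le _
  | succ d ih =>
      intro s hne
      rw [itemsB] at hne
      obtain ⟨c, hc, hcne⟩ : ∃ c ∈ childB route s, itemsB route d c ≠ [] := by
        by_contra hall
        push Not at hall
        exact hne (List.flatMap_eq_nil_iff.mpr hall)
      have h1 := ih c hcne
      have h2 := pv_childB_slack route s c hc
      omega

-- Source B's `while dfs((start, {start}, 0), depth): depth += 1` loop
def loopB (route : List (Int × List (Int × Int))) (maxcost start : Int)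
    (depth : Nat) (vis : List Int) : List Int :=
  let r := dfsB route maxcost depth (start, PySem.Set.ofList [start], 0) vis
  if r.2 then loopB route maxcost start (depth + 1) r.1 else r.1
termination_by (pvTargets route).length + 1 - depth
decreasing_by
  rename_i h
  have hspec := pv_dfsB_spec route maxcost depth (start, PySem.Set.ofList [start], 0) vis
  replace h : (dfsB route maxcost depth (start, PySem.Set.ofList [start], 0) vis).2 = true := h
  rw [hspec] at h
  have hne : itemsB route depth (start, PySem.Set.ofList [start], 0) ≠ [] := by
    simpa using h
  have h1 := pv_itemsB_le_slack route depth (start, PySem.Set.ofList [start], 0) hne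
  have h2 : pvSlack route (PySem.Set.ofList [start]) ≤ (pvTargets route).length := by
    unfold pvSlack
    exact List.length_filter_le _ _
  simp only at h1
  omega

def bfs_alt (route : List (Int × List (Int × Int))) (start : Int) (maxcost : Int) : List Int :=
  loopB route maxcost start 0 PySem.Set.empty

-- ===== PRECONDITION & SPEC =====
def Spec_bfs (route : List (Int × List (Int × Int))) (start : Int) (maxcost : Int) (out : List Int) : Prop := out = bfs_alt route start maxcost
instance (route : List (Int × List (Int × Int))) (start : Int) (maxcost : Int) (out : List Int) : Decidable (Spec_bfs route start maxcost out) := by unfold Spec_bfs; infer_instance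

-- ===== CLAIM (what is proved, stated in full; the proofs are below) =====
def Claim_equal_bfs : Prop := ∀ (route : List (Int × List (Int × Int))) (start : Int) (maxcost : Int), Dom_bfs route start maxcost → Spec_bfs route start maxcost (bfs route start maxcost)

-- ===== LEMMAS AND PROOFS =====

-- A's visited-update step, as a fold function
def updA (maxcost : Int) (visited : List Int) (it : Int × List Int × Int) : List Int :=
  if it.2.2 ≤ maxcost then
    (if PySem.Set.contains visited (PySem.List.pyGetD it.2.1 (-1) 0) then visited
     else PySem.Set.add visited (PySem.List.pyGetD it.2.1 (-1) 0))
  else visited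

-- the breadth-first enumeration of A's queue, level by level
def levelsA (route : List (Int × List (Int × Int)))
    (level : List (Int × List Int × Int)) : List (Int × List Int × Int) :=
  match level with
  | [] => []
  | x :: rest => (x :: rest) ++ levelsA route ((x :: rest).flatMap (childA route))
termination_by pvQMeas route level
decreasing_by
  have h1 := pv_childA_meas_lt route x
  have h2 : ∀ q : List (Int × List Int × Int),
      pvQMeas route (q.flatMap (childA route)) ≤ pvQMeas route q := by
    intro q
    induction q with
    | nil => simp [pvQMeas]
    | cons y t ih =>
        rw [List.flatMap_cons, pv_qmeas_append]
        have := pv_childA_meas_lt route y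
        have h3 : pvQMeas route (y :: t) = pvMeas route y + pvQMeas route t := by simp [pvQMeas]
        omega
  rw [List.flatMap_cons, pv_qmeas_append]
  have h4 := h2 rest
  have h5 : pvQMeas route (x :: rest) = pvMeas route x + pvQMeas route rest := by
    simp [pvQMeas]
  omega

lemma pv_qmeas_flatMap_le (route : List (Int × List (Int × Int)))
    (c : (Int × List Int × Int) → List (Int × List Int × Int))
    (hc : ∀ it, pvQMeas route (c it) < pvMeas route it) :
    ∀ q, pvQMeas route (q.flatMap c) ≤ pvQMeas route q := by
  intro q
  induction q with
  | nil => simp [pvQMeas]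
  | cons x t ih =>
      rw [List.flatMap_cons, pv_qmeas_append]
      have h1 := hc x
      have h2 : pvQMeas route (x :: t) = pvMeas route x + pvQMeas route t := by simp [pvQMeas]
      omega

lemma pv_qmeas_flatMap_lt (route : List (Int × List (Int × Int)))
    (c : (Int × List Int × Int) → List (Int × List Int × Int))
    (hc : ∀ it, pvQMeas route (c it) < pvMeas route it)
    (q : List (Int × List Int × Int)) (hq : q ≠ []) :
    pvQMeas route (q.flatMap c) < pvQMeas route q := by
  rcases q with _ | ⟨x, t⟩
  · exact absurd rfl hq
  rw [List.flatMap_cons, pv_qmeas_append]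
  have h1 := hc x
  have h2 := pv_qmeas_flatMap_le route c hc t
  have h3 : pvQMeas route (x :: t) = pvMeas route x + pvQMeas route t := by simp [pvQMeas]
  omega

-- A-side analogue of itemsB: states at exactly depth d below a state
def itemsA (route : List (Int × List (Int × Int))) :
    Nat → (Int × List Int × Int) → List (Int × List Int × Int)
  | 0, s => [s]
  | d + 1, s => (childA route s).flatMap (itemsA route d)

-- path-list state → path-set state
def pvAbs (it : Int × List Int × Int) : Int × List Int × Int :=
  (it.1, PySem.Set.ofList it.2.1, it.2.2)

lemma pv_childB_abs (route : List (Int × List (Int × Int))) (it : Int × List Int × Int) :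
    childB route (pvAbs it) = (childA route it).map pvAbs := by
  obtain ⟨n, path, cost⟩ := it
  unfold childB childA pvAbs PySem.Dict.getD
  cases h : (PySem.Dict.mk route).get? n with
  | none => simp
  | some adj =>
      simp only [Option.getD_some, List.map_map]
      have hfil : adj.filter (fun p => !(PySem.Set.contains (PySem.Set.ofList path) p.1))
          = adj.filter (fun p => !(path.contains p.1)) := by
        apply List.filter_congr
        intro p _
        by_cases hp : p.1 ∈ path <;>
          simp [PySem.Set.contains, hp, PySem.Set.mem_ofList]
      rw [hfil]
      apply List.map_congr_left
      intro p hp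
      have hnm : p.1 ∉ path := by
        have := (List.mem_filter.mp hp).2
        simpa using this
      have hone : PySem.Set.ofList [p.1] = [p.1] := rfl
      show (p.1, PySem.Set.union (PySem.Set.ofList path) (PySem.Set.ofList [p.1]), cost + p.2)
        = (p.1, PySem.Set.ofList (path ++ [p.1]), cost + p.2)
      rw [hone, PySem.Set.ofList_append_singleton]
      rfl

lemma pv_itemsB_abs (route : List (Int × List (Int × Int))) :
    ∀ (d : Nat) (s : Int × List Int × Int),
      itemsB route d (pvAbs s) = (itemsA route d s).map pvAbs := by
  intro d
  induction d with
  | zero => intro s; simp [itemsB, itemsA]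
  | succ d ih =>
      intro s
      rw [itemsB, itemsA, pv_childB_abs, List.flatMap_map, List.map_flatMap]
      apply List.flatMap_congr
      intro c _
      exact ih c

lemma pv_itemsA_succ (route : List (Int × List (Int × Int))) :
    ∀ (d : Nat) (s : Int × List Int × Int),
      itemsA route (d + 1) s = (itemsA route d s).flatMap (childA route) := by
  intro d
  induction d with
  | zero => intro s; simp [itemsA]
  | succ d ih =>
      intro s
      rw [itemsA]
      conv_rhs => rw [itemsA]
      rw [List.flatMap_assoc]
      apply List.flatMap_congr
      intro c _
      exact ih c

-- updB ignores the path component, so folding over abstracted states is the same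
lemma pv_foldl_updB_abs (maxcost : Int) (l : List (Int × List Int × Int)) (vis : List Int) :
    (l.map pvAbs).foldl (updB maxcost) vis = l.foldl (updB maxcost) vis := by
  rw [List.foldl_map]
  apply PySem.List.foldl_congr_mem
  intro acc it _
  obtain ⟨n, p, c⟩ := it
  rfl

-- levelsA unfolds unconditionally
lemma pv_levelsA_unfold (route : List (Int × List (Int × Int)))
    (lv : List (Int × List Int × Int)) :
    levelsA route lv = lv ++ levelsA route (lv.flatMap (childA route)) := by
  rcases lv with _ | ⟨x, t⟩
  · simp [levelsA]
  · rw [levelsA]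

-- the deepening loop of B folds updB over A's whole breadth-first enumeration
lemma pv_loopB_eq (route : List (Int × List (Int × Int))) (maxcost start : Int) :
    ∀ (fuel d : Nat) (vis : List Int),
      pvQMeas route (itemsA route d (start, [start], 0)) ≤ fuel →
      loopB route maxcost start d vis
        = (levelsA route (itemsA route d (start, [start], 0))).foldl (updB maxcost) vis := by
  intro fuel
  induction fuel with
  | zero =>
      intro d vis h
      have hnil : itemsA route d (start, [start], 0) = [] := by
        rcases hq : itemsA route d (start, [start], 0) with _ | ⟨x, t⟩
        · rfl
        · exfalso
          rw [hq] at h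
          have h2 : pvQMeas route (x :: t) = pvMeas route x + pvQMeas route t := by
            simp [pvQMeas]
          have h3 : 0 < pvMeas route x := pow_pos (Nat.succ_pos _) _
          omega
      rw [loopB]
      have habs : (start, PySem.Set.ofList [start], (0 : Int))
          = pvAbs (start, [start], 0) := rfl
      simp only [habs, pv_dfsB_spec, pv_itemsB_abs, hnil]
      simp [levelsA]
  | succ fuel ih =>
      intro d vis h
      rw [loopB]
      have habs : (start, PySem.Set.ofList [start], (0 : Int))
          = pvAbs (start, [start], 0) := rfl
      simp only [habs, pv_dfsB_spec, pv_itemsB_abs]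
      by_cases hnil : itemsA route d (start, [start], 0) = []
      · simp [hnil, levelsA]
      · have hcond : ((itemsA route d (start, [start], 0)).map pvAbs).isEmpty = false := by
          simp [hnil]
        rw [hcond]
        simp only [Bool.not_false, reduceIte]
        rw [pv_foldl_updB_abs]
        have hrec : pvQMeas route (itemsA route (d + 1) (start, [start], 0)) ≤ fuel := by
          rw [pv_itemsA_succ]
          have := pv_qmeas_flatMap_lt route (childA route) (pv_childA_meas_lt route)
            (itemsA route d (start, [start], 0)) hnil
          omega
        rw [ih (d + 1) _ hrec]
        rw [pv_levelsA_unfold route (itemsA route d (start, [start], 0))]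
        rw [← pv_itemsA_succ]
        rw [List.foldl_append]

lemma pv_lrot (route : List (Int × List (Int × Int))) :
    ∀ (fuel : Nat) (a b : List (Int × List Int × Int)), pvQMeas route (a ++ b) ≤ fuel →
      levelsA route (a ++ b) = a ++ levelsA route (b ++ a.flatMap (childA route)) := by
  intro fuel
  induction fuel with
  | zero =>
      intro a b h
      have hz : pvQMeas route (a ++ b) = 0 := Nat.le_zero.mp h
      have hnil : a ++ b = [] := by
        rcases hq : a ++ b with _ | ⟨x, t⟩
        · rfl
        · exfalso
          rw [hq] at hz
          have h2 : pvQMeas route (x :: t) = pvMeas route x + pvQMeas route t := by simp [pvQMeas]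
          have h3 : 0 < pvMeas route x := pow_pos (Nat.succ_pos _) _
          omega
      obtain ⟨rfl, rfl⟩ := List.append_eq_nil_iff.mp hnil
      simp [levelsA]
  | succ fuel ih =>
      intro a b h
      rcases a with _ | ⟨x, a'⟩
      · simp
      · have hkey : levelsA route (b ++ (childA route x ++ a'.flatMap (childA route)))
            = b ++ levelsA route ((childA route x ++ a'.flatMap (childA route)) ++ b.flatMap (childA route)) := by
          apply ih
          have h1 := pv_childA_meas_lt route x
          have h2 := pv_qmeas_flatMap_le route (childA route) (pv_childA_meas_lt route) a'
          have h3 : pvQMeas route ((x :: a') ++ b)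
              = pvMeas route x + pvQMeas route a' + pvQMeas route b := by
            simp only [pvQMeas, List.cons_append, List.map_cons, List.map_append,
              List.sum_cons, List.sum_append]
            omega
          have h4 : pvQMeas route (b ++ (childA route x ++ a'.flatMap (childA route)))
              = pvQMeas route b + (pvQMeas route (childA route x) + pvQMeas route (a'.flatMap (childA route))) := by
            rw [pv_qmeas_append, pv_qmeas_append]
          omega
        have hL : levelsA route ((x :: a') ++ b)
            = (x :: (a' ++ b)) ++ levelsA route ((x :: (a' ++ b)).flatMap (childA route)) := by
          rw [List.cons_append]
          rw [levelsA]
        rw [hL]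
        have hfm : (x :: (a' ++ b)).flatMap (childA route)
            = childA route x ++ (a'.flatMap (childA route) ++ b.flatMap (childA route)) := by
          simp [List.flatMap_cons, List.flatMap_append]
        rw [hfm]
        have hfm2 : (x :: a').flatMap (childA route)
            = childA route x ++ a'.flatMap (childA route) := by
          simp [List.flatMap_cons]
        rw [hfm2, hkey]
        simp [List.append_assoc]

-- A's loop folds updA over the breadth-first enumeration (as in the A-side port proof)
lemma pv_loopA_eq (route : List (Int × List (Int × Int))) (maxcost : Int) :
    ∀ (fuel : Nat) (q : List (Int × List Int × Int)) (vis : List Int),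
      pvQMeas route q ≤ fuel →
      loopA route maxcost q vis = (levelsA route q).foldl (updA maxcost) vis := by
  intro fuel
  induction fuel with
  | zero =>
      intro q vis h
      rcases q with _ | ⟨x, t⟩
      · simp [loopA, levelsA]
      · exfalso
        have h2 : pvQMeas route (x :: t) = pvMeas route x + pvQMeas route t := by simp [pvQMeas]
        have h3 : 0 < pvMeas route x := pow_pos (Nat.succ_pos _) _
        omega
  | succ fuel ih =>
      intro q vis h
      rcases q with _ | ⟨⟨n, path, cost⟩, rest⟩
      · simp [loopA, levelsA]
      · rw [loopA]
        have hstep : pvQMeas route (rest ++ childA route (n, path, cost)) ≤ fuel := by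
          rw [pv_qmeas_append]
          have h1 := pv_childA_meas_lt route (n, path, cost)
          have h2 : pvQMeas route ((n, path, cost) :: rest)
              = pvMeas route (n, path, cost) + pvQMeas route rest := by simp [pvQMeas]
          omega
        rw [ih _ _ hstep]
        have hrot : levelsA route ((n, path, cost) :: rest)
            = [(n, path, cost)] ++ levelsA route (rest ++ childA route (n, path, cost)) := by
          have := pv_lrot route (fuel + 1) [(n, path, cost)] rest (by simpa using h)
          simpa using this
        rw [hrot]
        rfl

lemma pv_childA_last (route : List (Int × List (Int × Int))) (it c : Int × List Int × Int)
    (hc : c ∈ childA route it) : PySem.List.pyGetD c.2.1 (-1) 0 = c.1 := by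
  unfold childA at hc
  cases h : (PySem.Dict.mk route).get? it.1 with
  | none => rw [h] at hc; simp at hc
  | some adj =>
      rw [h] at hc
      simp only [List.mem_map] at hc
      obtain ⟨p, _, rfl⟩ := hc
      exact PySem.List.pyGetD_neg_one_append_singleton _ _ _

lemma pv_levelsA_last (route : List (Int × List (Int × Int))) :
    ∀ (fuel : Nat) (q : List (Int × List Int × Int)), pvQMeas route q ≤ fuel →
      (∀ it ∈ q, PySem.List.pyGetD it.2.1 (-1) 0 = it.1) →
      ∀ it ∈ levelsA route q, PySem.List.pyGetD it.2.1 (-1) 0 = it.1 := by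
  intro fuel
  induction fuel with
  | zero =>
      intro q h hq it hit
      rcases q with _ | ⟨x, t⟩
      · simp [levelsA] at hit
      · exfalso
        have h2 : pvQMeas route (x :: t) = pvMeas route x + pvQMeas route t := by simp [pvQMeas]
        have h3 : 0 < pvMeas route x := pow_pos (Nat.succ_pos _) _
        omega
  | succ fuel ih =>
      intro q h hq it hit
      rcases q with _ | ⟨x, t⟩
      · simp [levelsA] at hit
      · rw [levelsA] at hit
        rcases List.mem_append.mp hit with hin | hin
        · exact hq it hin
        · refine ih _ ?_ ?_ it hin
          · have := pv_qmeas_flatMap_lt route (childA route) (pv_childA_meas_lt route) (x :: t) (by simp)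
            omega
          · intro c hc
            obtain ⟨y, _, hcy⟩ := List.mem_flatMap.mp hc
            exact pv_childA_last route y c hcy

-- ===== VERDICT (by name: the statement is the Claim_ definition above) =====
theorem bfs_spec : Claim_equal_bfs := by
  intro route start maxcost _
  unfold Spec_bfs bfs bfs_alt
  rw [pv_loopA_eq route maxcost (pvQMeas route [(start, [start], 0)]) _ _ le_rfl]
  rw [pv_loopB_eq route maxcost start (pvQMeas route (itemsA route 0 (start, [start], 0))) 0 _ le_rfl]
  have h0 : itemsA route 0 (start, [start], 0) = [(start, [start], 0)] := rfl
  rw [h0]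
  apply PySem.List.foldl_congr_mem
  intro acc it hit
  have hlast : PySem.List.pyGetD it.2.1 (-1) 0 = it.1 := by
    refine pv_levelsA_last route (pvQMeas route [(start, [start], 0)]) _ le_rfl ?_ it hit
    intro c hc
    rcases List.mem_singleton.mp hc with rfl
    simpa using PySem.List.pyGetD_neg_one_append_singleton ([] : List Int) start 0
  unfold updA updB
  rw [hlast]
  by_cases hcost : it.2.2 ≤ maxcost
  · simp only [hcost, if_true]
    by_cases hmem : PySem.Set.contains acc it.1 <;>
      simp [PySem.Set.add, PySem.Set.contains]
  · simp [hcost]
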